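-- pv_equiv track=rewrite | github.com/4Tech-Labs/ADAM-EDU | backend/src/case_generator/narrative_grounding.py | _sentence_bounds
-- ===== SOURCE A (Python) =====
-- def _sentence_bounds(prose: str, start: int, end: int) -> tuple[int, int]:
--     left_candidates = [prose.rfind(boundary, 0, start) for boundary in ".!?\n"]
--     left = max(left_candidates)
--     seg_start = 0 if left == -1 else left + 1
--     right_positions = [
--         position for boundary in ".!?\n"
--         if (position := prose.find(boundary, end)) != -1
--     ]
--     seg_end = min(right_positions) + 1 if right_positions else len(prose)
--     return seg_start, seg_end
-- ===== SOURCE B (Python) =====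
-- BOUNDS = ".!?\n"
--
--
-- def _sentence_bounds(prose: str, start: int, end: int) -> tuple[int, int]:
--     head = prose[:start]
--     seg_start = 0
--     for i in range(len(head) - 1, -1, -1):
--         if head[i] in BOUNDS:
--             seg_start = i + 1
--             break
--     tail = prose[end:]
--     offset = len(prose) - len(tail)
--     seg_end = len(prose)
--     for k, c in enumerate(tail):
--         if c in BOUNDS:
--             seg_end = offset + k + 1
--             break
--     return seg_start, seg_end
-- ===== Notes on version B (the rewrite author's own statement) =====
-- stated objective: simpler
-- what changed: Replaces the four rfind/find library scans plus max/min candidate bookkeeping with a slice on each side and one explicit backward and one forward character scan over it.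
import Mathlib
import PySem

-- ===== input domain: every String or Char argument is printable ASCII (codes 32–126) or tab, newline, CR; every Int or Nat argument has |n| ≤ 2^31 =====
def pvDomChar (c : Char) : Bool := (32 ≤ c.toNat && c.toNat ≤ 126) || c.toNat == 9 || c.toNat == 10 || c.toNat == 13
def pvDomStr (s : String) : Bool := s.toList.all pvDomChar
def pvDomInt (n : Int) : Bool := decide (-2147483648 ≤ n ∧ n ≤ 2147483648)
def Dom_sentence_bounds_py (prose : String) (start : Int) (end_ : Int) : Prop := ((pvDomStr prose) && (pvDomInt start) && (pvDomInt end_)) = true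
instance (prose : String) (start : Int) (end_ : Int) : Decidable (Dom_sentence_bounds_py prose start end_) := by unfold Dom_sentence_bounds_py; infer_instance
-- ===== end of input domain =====

-- B replaces A's four rfind/find library scans plus max/min candidate lists with a slice on
-- each side and one explicit backward / forward character scan over it (same cost).


-- ===== PORT A =====
-- literal port of A: per-boundary rfind(b, 0, start) candidates, their max,
-- per-boundary find(b, end) positions filtered of -1, their min.
def sentence_bounds_py (prose : String) (start : Int) (end_ : Int) : Int × Int :=
  let left_candidates := ".!?\n".toList.map
    (fun b => PySem.Str.rfindFrom prose (String.mk [b]) 0 (some start))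
  let left := (PySem.List.max? left_candidates id).getD (-1)  -- list is nonempty: Python max never raises
  let seg_start : Int := if left = -1 then 0 else left + 1
  let right_positions := (".!?\n".toList.map
    (fun b => PySem.Str.findFrom prose (String.mk [b]) end_ none)).filter (fun p => p ≠ -1)
  let seg_end : Int :=
    match PySem.List.min? right_positions id with
    | some m => m + 1
    | none => PySem.Str.len prose
  (seg_start, seg_end)

-- ===== PORT B =====
def pvIsB (c : Char) : Bool := ".!?\n".toList.contains c

-- backward for-loop over range(start-1, -1, -1): returns i+1 at the first boundary char, 0 if none
def pvScanBack (cs : List Char) : Nat → Int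
  | 0 => 0
  | i + 1 => if pvIsB (cs.getD i ' ') then (i : Int) + 1 else pvScanBack cs i

-- forward for-loop over range(end, n), j the absolute index; j+1 at the first boundary, n if none
def pvScanFwd (j : Nat) : List Char → Int
  | [] => (j : Int)
  | c :: rest => if pvIsB c then (j : Int) + 1 else pvScanFwd (j + 1) rest

def sentence_bounds_py_alt (prose : String) (start : Int) (end_ : Int) : Int × Int :=
  let cs := prose.toList
  let head := PySem.Chars.slice cs none (some start)     -- prose[:start]
  let seg_start := pvScanBack head head.length           -- for i in range(len(head)-1, -1, -1)
  let tail := PySem.Chars.slice cs (some end_) none      -- prose[end:]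
  let offset := cs.length - tail.length
  (seg_start, pvScanFwd offset tail)                     -- for k, c in enumerate(tail); j = offset + k

-- ===== PRECONDITION & SPEC =====
def Spec_sentence_bounds_py (prose : String) (start : Int) (end_ : Int) (out : Int × Int) : Prop := out = sentence_bounds_py_alt prose start end_
instance (prose : String) (start : Int) (end_ : Int) (out : Int × Int) : Decidable (Spec_sentence_bounds_py prose start end_ out) := by unfold Spec_sentence_bounds_py; infer_instance

-- ===== CLAIM (what is proved, stated in full; the proofs are below) =====
def Claim_equal_sentence_bounds_py : Prop := ∀ (prose : String) (start : Int) (end_ : Int), Dom_sentence_bounds_py prose start end_ → Spec_sentence_bounds_py prose start end_ (sentence_bounds_py prose start end_)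

-- ===== LEMMAS AND PROOFS =====

-- Python slice-bound clamping of an int index into [0, n] (proof-side only)
def pvClamp (n : Nat) (i : Int) : Nat :=
  if i < 0 then (if i + n < 0 then 0 else (i + n).toNat)
  else min i.toNat n

theorem pv_go_zero (s sub : List Char) : PySem.Chars.rfind.go s sub 0 = if sub.isPrefixOf s then 0 else -1 := by
  simp [PySem.Chars.rfind.go]

theorem pv_go_succ (s sub : List Char) (j : Nat) : PySem.Chars.rfind.go s sub (j+1) = if sub.isPrefixOf (s.drop (j+1)) then ((j:Int)+1) else PySem.Chars.rfind.go s sub j := by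
  rw [PySem.Chars.rfind.go]; push_cast; ring_nf

theorem pv_single_pref (c : Char) (l : List Char) (x : Char) (h : l ≠ []) :
    [c].isPrefixOf (l ++ [x]) = [c].isPrefixOf l := by
  cases l with
  | nil => exact absurd rfl h
  | cons a t => simp [List.isPrefixOf]

theorem pv_rfind_go_append (p : List Char) (x c : Char) :
    ∀ k, k < p.length → PySem.Chars.rfind.go (p ++ [x]) [c] k = PySem.Chars.rfind.go p [c] k := by
  intro k
  induction k with
  | zero =>
    intro h
    rw [pv_go_zero, pv_go_zero, pv_single_pref]
    exact List.ne_nil_of_length_pos h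
  | succ j ih =>
    intro h
    rw [pv_go_succ, pv_go_succ, List.drop_append_of_le_length (by omega), pv_single_pref, ih (by omega)]
    intro he
    have := List.length_drop (l := p) (i := j+1)
    rw [he] at this
    simp at this; omega

theorem pv_rfind_nil (c : Char) : PySem.Chars.rfind [] [c] = -1 := by
  simp [PySem.Chars.rfind, pv_go_zero, List.isPrefixOf]

theorem pv_rfind_snoc (p : List Char) (x c : Char) :
    PySem.Chars.rfind (p ++ [x]) [c] = if x = c then (p.length : Int) else PySem.Chars.rfind p [c] := by
  unfold PySem.Chars.rfind
  rw [List.length_append, List.length_cons, List.length_nil, Nat.add_zero, pv_go_succ]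
  rw [show (p.length + 1) = (p ++ [x]).length by simp, List.drop_length]
  simp only [List.isPrefixOf, if_false, Bool.false_eq_true, ite_false]
  cases hp : p.length with
  | zero =>
    have : p = [] := List.eq_nil_of_length_eq_zero hp
    subst this
    rw [pv_go_zero, pv_go_zero]
    by_cases hxc : x = c
    · simp [List.isPrefixOf, hxc]
    · have h1 : ([c].isPrefixOf ([] ++ [x])) = false := by
        simp [List.isPrefixOf]; exact fun h => hxc h.symm
      simp [h1, List.isPrefixOf, hxc]
      exact fun h => hxc h.symm
  | succ m =>
    rw [pv_go_succ]
    have hd : (p ++ [x]).drop (m+1) = [x] := by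
      rw [List.drop_append_of_le_length (by omega)]
      have : p.drop (m+1) = [] := by rw [List.drop_eq_nil_iff]; omega
      simp [this]
    rw [hd]
    by_cases hxc : x = c
    · have : ([c].isPrefixOf [x]) = true := by simp [List.isPrefixOf, hxc]
      rw [this]
      simp [hxc, hp]
    · have : ([c].isPrefixOf [x]) = false := by
        simp [List.isPrefixOf]; exact fun h => hxc h.symm
      rw [this]
      simp only [Bool.false_eq_true, if_false, hxc, ite_false]
      rw [pv_rfind_go_append p x c m (by omega), pv_go_succ]
      have hnil : p.drop (m+1) = [] := by rw [List.drop_eq_nil_iff]; omega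
      rw [hnil]
      simp [List.isPrefixOf]

theorem pv_rfind_lt (p : List Char) (c : Char) :
    -1 ≤ PySem.Chars.rfind p [c] ∧ PySem.Chars.rfind p [c] < p.length := by
  induction p using List.reverseRecOn with
  | nil => rw [pv_rfind_nil]; simp
  | append_singleton q x ih =>
    rw [pv_rfind_snoc]
    simp only [List.length_append, List.length_cons, List.length_nil]
    split_ifs <;> push_cast <;> omega

theorem pv_fgo_nil (c : Char) (k : Nat) : PySem.Chars.find.go [c] [] k = -1 := by
  simp [PySem.Chars.find.go]

theorem pv_fgo_cons (c a : Char) (t : List Char) (k : Nat) :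
    PySem.Chars.find.go [c] (a :: t) k = if c = a then (k : Int) else PySem.Chars.find.go [c] t (k+1) := by
  rw [PySem.Chars.find.go]
  by_cases h : c = a <;> simp [List.isPrefixOf, h]

theorem pv_find_nil (c : Char) : PySem.Chars.find [] [c] = -1 := by
  simp [PySem.Chars.find, pv_fgo_nil]

theorem pv_neg_one_le_find (t : List Char) (c : Char) : -1 ≤ PySem.Chars.find t [c] :=
  PySem.Chars.neg_one_le_find t [c]

theorem pv_find_go_shift (c : Char) (t : List Char) :
    ∀ k : Nat, PySem.Chars.find.go [c] t k =
      if PySem.Chars.find t [c] = -1 then -1 else (k : Int) + PySem.Chars.find t [c] := by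
  induction t with
  | nil => intro k; simp [pv_fgo_nil, pv_find_nil]
  | cons a t ih =>
    intro k
    have hf : PySem.Chars.find (a :: t) [c] = PySem.Chars.find.go [c] (a :: t) 0 := rfl
    rw [pv_fgo_cons, hf, pv_fgo_cons]
    by_cases h : c = a
    · simp [h]
    · simp only [h, if_false, ite_false]
      rw [ih (k+1), ih 1]
      have := pv_neg_one_le_find t c
      split_ifs <;> push_cast <;> omega

theorem pv_find_cons (a c : Char) (t : List Char) :
    PySem.Chars.find (a :: t) [c] =
      if a = c then 0
      else if PySem.Chars.find t [c] = -1 then -1 else 1 + PySem.Chars.find t [c] := by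
  have hf : PySem.Chars.find (a :: t) [c] = PySem.Chars.find.go [c] (a :: t) 0 := rfl
  rw [hf, pv_fgo_cons, pv_find_go_shift]
  by_cases h : c = a
  · simp [h]
  · have h' : ¬ a = c := fun he => h he.symm
    simp [h, h']


theorem pv_rfindFrom_eq (cs : List Char) (c : Char) (start : Int) :
    PySem.Chars.rfindFrom cs [c] 0 (some start) =
      PySem.Chars.rfind (cs.take (pvClamp cs.length start)) [c] := by
  unfold PySem.Chars.rfindFrom
  norm_num
  have hcl : (if (cs.length:Int) < start then (cs.length:Int) else if start < 0 then (if start + cs.length < 0 then 0 else start + cs.length) else start).toNat = pvClamp cs.length start := by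
    unfold pvClamp; split_ifs <;> omega
  rw [hcl]
  split_ifs with h <;> omega

theorem pv_findFrom_eq (cs : List Char) (c : Char) (end_ : Int) :
    PySem.Chars.findFrom cs [c] end_ none =
      (if PySem.Chars.find (cs.drop (pvClamp cs.length end_)) [c] = -1 then -1
       else (pvClamp cs.length end_ : Int) + PySem.Chars.find (cs.drop (pvClamp cs.length end_)) [c]) := by
  unfold PySem.Chars.findFrom
  simp only [Int.toNat_natCast, List.take_length]
  by_cases hbig : (cs.length : Int) < end_
  · have hst : ¬ end_ < 0 := by omega
    have hlt : (cs.length : Int) < (if end_ < 0 then (if end_ + cs.length < 0 then 0 else end_ + cs.length) else end_) := by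
      simp [hst]; omega
    have hcl : pvClamp cs.length end_ = cs.length := by unfold pvClamp; split_ifs <;> omega
    rw [if_pos hlt, hcl, List.drop_length, pv_find_nil]
    simp
  · have hst : ¬ ((cs.length:Int) < (if end_ < 0 then (if end_ + cs.length < 0 then 0 else end_ + cs.length) else end_)) := by
      split_ifs <;> omega
    rw [if_neg hst]
    have hcl : ((if end_ < 0 then (if end_ + cs.length < 0 then 0 else end_ + cs.length) else end_)).toNat = pvClamp cs.length end_ := by
      unfold pvClamp; split_ifs <;> omega
    rw [hcl]
    have hnn : (0:Int) ≤ (if end_ < 0 then (if end_ + cs.length < 0 then 0 else end_ + cs.length) else end_) := by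
      split_ifs <;> omega
    have hcast : (if end_ < 0 then (if end_ + (cs.length:Int) < 0 then 0 else end_ + cs.length) else end_) = ((pvClamp cs.length end_ : Nat) : Int) := by
      rw [← hcl]; omega
    rw [hcast]

theorem pv_max4 (a b c d : Int) :
    (PySem.List.max? [a,b,c,d] id).getD (-1) = max (max (max a b) c) d := by
  unfold PySem.List.max?
  simp only [List.foldl, id]
  split_ifs <;> simp <;> split_ifs <;> simp <;> split_ifs <;> simp <;> omega

theorem pv_left_eq (cs : List Char) : ∀ hi : Nat, hi ≤ cs.length →
    (let l := (PySem.List.max? (['.','!','?','\n'].map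
        (fun b => PySem.Chars.rfind (cs.take hi) [b])) id).getD (-1)
     if l = -1 then (0 : Int) else l + 1) = pvScanBack cs hi := by
  intro hi
  induction hi with
  | zero =>
    intro _
    simp [pv_rfind_nil, PySem.List.max?, pvScanBack]
  | succ hi ih =>
    intro h
    have hlt : hi < cs.length := by omega
    have hx : cs[hi]? = some (cs.getD hi ' ') := by
      rw [List.getElem?_eq_getElem hlt, List.getD_eq_getElem?_getD, List.getElem?_eq_getElem hlt]
      rfl
    have htake : cs.take (hi+1) = cs.take hi ++ [cs.getD hi ' '] := by
      rw [List.take_succ, hx]; rfl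
    have hlen : (cs.take hi).length = hi := by simp; omega
    set x := cs.getD hi ' ' with hxdef
    have hsb : pvScanBack cs (hi+1) = if pvIsB x then (hi:Int)+1 else pvScanBack cs hi := rfl
    simp only [htake, List.map, pv_rfind_snoc, hlen, hsb]
    have b1 := pv_rfind_lt (cs.take hi) '.'
    have b2 := pv_rfind_lt (cs.take hi) '!'
    have b3 := pv_rfind_lt (cs.take hi) '?'
    have b4 := pv_rfind_lt (cs.take hi) '\n'
    rw [hlen] at b1 b2 b3 b4
    by_cases hxB : pvIsB x
    · have hx4 : x = '.' ∨ x = '!' ∨ x = '?' ∨ x = '\n' := by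
        have := hxB; unfold pvIsB at this; simp at this; tauto
      simp only [hxB, if_true]
      rcases hx4 with h4 | h4 | h4 | h4 <;> rw [h4] <;> norm_num <;>
        rw [pv_max4] <;> split_ifs <;> omega
    · have hx4 : ¬ x = '.' ∧ ¬ x = '!' ∧ ¬ x = '?' ∧ ¬ x = '\n' := by
        have := hxB; unfold pvIsB at this; simp at this; tauto
      simp only [hxB, if_false, hx4.1, hx4.2.1, hx4.2.2.1, hx4.2.2.2, ite_false]
      have := ih (by omega)
      simpa [List.map] using this


theorem pv_min?_nil : PySem.List.min? ([] : List Int) id = none := rfl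

theorem pv_min?_cons (l : List Int) : ∀ x : Int, PySem.List.min? (x :: l) id = some (List.foldl min x l) := by
  induction l with
  | nil => intro x; rfl
  | cons y t ih =>
    intro x
    have h1 : PySem.List.min? (x :: y :: t) id = PySem.List.min? (min x y :: t) id := by
      unfold PySem.List.min?
      simp only [List.foldl]
      congr 1
      show (if id y < id x then some y else some x) = _
      simp only [id]; split_ifs with h
      · rw [min_eq_right (le_of_lt h)]
      · rw [min_eq_left (not_lt.1 h)]
    rw [h1, ih]
    simp [List.foldl]

set_option maxHeartbeats 1600000 in
theorem pv_right_eq : ∀ (rest : List Char) (j : Nat),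
    (match PySem.List.min? ((['.','!','?','\n'].map
        (fun b => if PySem.Chars.find rest [b] = -1 then (-1 : Int)
                  else (j : Int) + PySem.Chars.find rest [b])).filter (fun p => p ≠ -1)) id with
     | some m => m + 1
     | none => (j : Int) + rest.length) = pvScanFwd j rest := by
  intro rest
  induction rest with
  | nil =>
    intro j
    simp [pv_find_nil, PySem.List.min?, pvScanFwd]
  | cons a t ih =>
    intro j
    have b1 := pv_neg_one_le_find t '.'
    have b2 := pv_neg_one_le_find t '!'
    have b3 := pv_neg_one_le_find t '?'
    have b4 := pv_neg_one_le_find t '\n'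
    simp only [List.map, pv_find_cons]
    by_cases haB : pvIsB a
    · have hsf : pvScanFwd j (a :: t) = (j:Int) + 1 := by simp [pvScanFwd, haB]
      rw [hsf]
      have ha4 : a = '.' ∨ a = '!' ∨ a = '?' ∨ a = '\n' := by
        have := haB; unfold pvIsB at this; simp at this; tauto
      have hj : ((j:Int)) ≠ -1 := by omega
      rcases ha4 with h4 | h4 | h4 | h4 <;> rw [h4] <;> norm_num <;>
        [skip; skip; skip; skip] <;>
      · by_cases e1 : PySem.Chars.find t ['.'] = -1 <;>
        by_cases e2 : PySem.Chars.find t ['!'] = -1 <;>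
        by_cases e3 : PySem.Chars.find t ['?'] = -1 <;>
        by_cases e4 : PySem.Chars.find t ['\n'] = -1 <;>
        simp only [e1, e2, e3, e4, if_true, if_false, ite_true, ite_false, hj] <;>
        simp [List.filter, hj, pv_min?_cons, pv_min?_nil, List.foldl, b1, b2, b3, b4,
          e1, e2, e3, e4,
          show ∀ r : Int, -1 ≤ r → ¬(r = -1) → (j:Int) + (1 + r) ≠ -1 from by intros; omega,
          show ∀ r : Int, -1 ≤ r → ¬(r = -1) → ¬(1 + r = -1) from by intros; omega] <;>
        omega
    · have hsf : pvScanFwd j (a :: t) = pvScanFwd (j+1) t := by simp [pvScanFwd, haB]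
      rw [hsf]
      have ha4 : ¬ a = '.' ∧ ¬ a = '!' ∧ ¬ a = '?' ∧ ¬ a = '\n' := by
        have := haB; unfold pvIsB at this; simp at this; tauto
      have hcand : ∀ c : Char, -1 ≤ PySem.Chars.find t [c] →
          (if (if PySem.Chars.find t [c] = -1 then (-1:Int) else 1 + PySem.Chars.find t [c]) = -1 then (-1:Int)
           else (j:Int) + (if PySem.Chars.find t [c] = -1 then (-1:Int) else 1 + PySem.Chars.find t [c]))
          = (if PySem.Chars.find t [c] = -1 then (-1:Int) else ((j+1:Nat):Int) + PySem.Chars.find t [c]) := by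
        intro c hc; split_ifs <;> push_cast <;> omega
      simp only [ha4.1, ha4.2.1, ha4.2.2.1, ha4.2.2.2, if_false, ite_false]
      rw [hcand '.' b1, hcand '!' b2, hcand '?' b3, hcand '\n' b4]
      have hih := ih (j+1)
      simp only [List.map] at hih
      cases hmin : PySem.List.min? ((List.filter (fun p => decide (p ≠ -1))
          [if PySem.Chars.find t ['.'] = -1 then (-1:Int) else ((j+1:Nat):Int) + PySem.Chars.find t ['.'],
           if PySem.Chars.find t ['!'] = -1 then (-1:Int) else ((j+1:Nat):Int) + PySem.Chars.find t ['!'],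
           if PySem.Chars.find t ['?'] = -1 then (-1:Int) else ((j+1:Nat):Int) + PySem.Chars.find t ['?'],
           if PySem.Chars.find t ['\n'] = -1 then (-1:Int) else ((j+1:Nat):Int) + PySem.Chars.find t ['\n']])) id with
      | some m =>
        rw [hmin] at hih
        simpa using hih
      | none =>
        rw [hmin] at hih
        simp only at hih ⊢
        rw [← hih, List.length_cons]
        push_cast; ring

theorem pv_clamp_le (n : Nat) (i : Int) : pvClamp n i ≤ n := by
  unfold pvClamp; split_ifs <;> omega

theorem pv_main (prose : String) (start : Int) (end_ : Int) :
    sentence_bounds_py prose start end_ =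
      (pvScanBack prose.toList (pvClamp prose.toList.length start),
       pvScanFwd (pvClamp prose.toList.length end_)
         (prose.toList.drop (pvClamp prose.toList.length end_))) := by
  unfold sentence_bounds_py
  have hb : (".!?\n").toList = ['.', '!', '?', '\n'] := rfl
  simp only [PySem.Str.rfindFrom_eq, PySem.Str.findFrom_eq, hb, List.map]
  have hm : ∀ c : Char, (String.mk [c]).toList = [c] := fun c => String.toList_ofList
  simp only [hm]
  rw [pv_rfindFrom_eq, pv_rfindFrom_eq, pv_rfindFrom_eq, pv_rfindFrom_eq,
      pv_findFrom_eq, pv_findFrom_eq, pv_findFrom_eq, pv_findFrom_eq]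
  rw [Prod.mk.injEq]
  constructor
  · have hL := pv_left_eq prose.toList (pvClamp prose.toList.length start)
      (pv_clamp_le prose.toList.length start)
    simp only [List.map] at hL
    exact hL
  · have hlen2 : PySem.Str.len prose =
        ((pvClamp prose.toList.length end_ : Nat) : Int) +
          ((prose.toList.drop (pvClamp prose.toList.length end_)).length : Int) := by
      have h1 := pv_clamp_le prose.toList.length end_
      have h2 : (prose.toList.drop (pvClamp prose.toList.length end_)).length
          = prose.toList.length - pvClamp prose.toList.length end_ := List.length_drop
      rw [h2]
      have h3 : PySem.Str.len prose = (prose.toList.length : Int) := by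
        simp [PySem.Str.len]
      rw [h3]; omega
    rw [hlen2]
    have hR := pv_right_eq (prose.toList.drop (pvClamp prose.toList.length end_))
      (pvClamp prose.toList.length end_)
    simp only [List.map] at hR
    exact hR

theorem pv_clampIdx_eq (n : Nat) (i : Int) : PySem.List.clampIdx n i = pvClamp n i := by
  unfold PySem.List.clampIdx pvClamp; split_ifs <;> omega

theorem pv_slice_to (cs : List Char) (i : Int) :
    PySem.Chars.slice cs none (some i) = cs.take (pvClamp cs.length i) := by
  show List.take (PySem.List.clampIdx cs.length i - 0) (List.drop 0 cs) = _
  rw [pv_clampIdx_eq]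
  simp

theorem pv_slice_from (cs : List Char) (i : Int) :
    PySem.Chars.slice cs (some i) none = cs.drop (pvClamp cs.length i) := by
  show List.take (cs.length - PySem.List.clampIdx cs.length i) (List.drop (PySem.List.clampIdx cs.length i) cs) = _
  rw [pv_clampIdx_eq]
  have := pv_clamp_le cs.length i
  exact List.take_of_length_le (by simp [List.length_drop])

theorem pv_scanBack_take (cs : List Char) (h : Nat) :
    ∀ k, k ≤ h → pvScanBack (cs.take h) k = pvScanBack cs k := by
  intro k
  induction k with
  | zero => intro _; rfl
  | succ i ih =>
    intro hk
    have hget : (cs.take h).getD i ' ' = cs.getD i ' ' := by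
      rw [List.getD_eq_getElem?_getD, List.getD_eq_getElem?_getD, List.getElem?_take_of_lt (by omega)]
    show (if pvIsB ((cs.take h).getD i ' ') then (i:Int)+1 else pvScanBack (cs.take h) i)
        = (if pvIsB (cs.getD i ' ') then (i:Int)+1 else pvScanBack cs i)
    rw [hget, ih (by omega)]

-- ===== VERDICT (by name: the statement is the Claim_ definition above) =====
theorem sentence_bounds_py_spec : Claim_equal_sentence_bounds_py := by
  intro prose start end_ _
  show sentence_bounds_py prose start end_ = sentence_bounds_py_alt prose start end_
  rw [pv_main]
  simp only [sentence_bounds_py_alt, pv_slice_to, pv_slice_from]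
  have hs := pv_clamp_le prose.toList.length start
  have he := pv_clamp_le prose.toList.length end_
  have hlen : (prose.toList.take (pvClamp prose.toList.length start)).length
      = pvClamp prose.toList.length start := by rw [List.length_take]; omega
  have hoff : prose.toList.length
      - (prose.toList.drop (pvClamp prose.toList.length end_)).length
      = pvClamp prose.toList.length end_ := by
    rw [List.length_drop]; omega
  simp only [hlen, hoff]
  rw [pv_scanBack_take prose.toList (pvClamp prose.toList.length start) _ (le_refl _)]
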